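-- pv_equiv track=rewrite | github.com/NathanielFelleke/FPGA-AudioSynth | sources/sim/waveform_check.py | simulate_triangle
-- ===== SOURCE A (Python) =====
-- def simulate_triangle(num_samples=1000):
--     """Simulate the triangle generator logic"""
--     phase_incr = 2**32 // 100  # About 100 samples per period
--     phase = 0
--     output = []
--
--     for _ in range(num_samples):
--         # Extract bit 31 (sign bit of phase)
--         msb = (phase >> 31) & 1
--         # Extract lower 31 bits
--         lower_bits = phase & 0x7FFFFFFF
--
--         if msb == 0:
--             # First half: rising
--             # Shift phase left by 1 to use full 32-bit range
--             triangle = (lower_bits << 1)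
--             # Convert to signed 32-bit
--             if triangle >= 2**31:
--                 triangle = triangle - 2**32
--         else:
--             # Second half: falling (invert to create down-slope)
--             inverted = (~lower_bits) & 0x7FFFFFFF
--             triangle = (inverted << 1)
--             # Convert to signed 32-bit
--             if triangle >= 2**31:
--                 triangle = triangle - 2**32
--
--         output.append(triangle)
--         phase = (phase + phase_incr) & 0xFFFFFFFF
--
--     return output
-- ===== SOURCE B (Python) =====
-- def simulate_triangle(num_samples=1000):
--     """Stateless re-implementation: phase is computed in closed form per index."""
--     phase_incr = 2**32 // 100
--     return [_tri_sample((i * phase_incr) % 2**32) for i in range(num_samples)]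
--
--
-- def _tri_sample(phase):
--     lower_bits = phase & 0x7FFFFFFF
--     sel = lower_bits if (phase >> 31) & 1 == 0 else (~lower_bits) & 0x7FFFFFFF
--     t = sel << 1
--     return t - 2**32 if t >= 2**31 else t
-- ===== Notes on version B (the rewrite author's own statement) =====
-- stated objective: alternative
-- what changed: B drops the running phase accumulator and builds the list with a comprehension computing each phase in closed form as (i*phase_incr) mod 2^32, with the branch folded into a single select-then-convert helper.
import Mathlib
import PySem

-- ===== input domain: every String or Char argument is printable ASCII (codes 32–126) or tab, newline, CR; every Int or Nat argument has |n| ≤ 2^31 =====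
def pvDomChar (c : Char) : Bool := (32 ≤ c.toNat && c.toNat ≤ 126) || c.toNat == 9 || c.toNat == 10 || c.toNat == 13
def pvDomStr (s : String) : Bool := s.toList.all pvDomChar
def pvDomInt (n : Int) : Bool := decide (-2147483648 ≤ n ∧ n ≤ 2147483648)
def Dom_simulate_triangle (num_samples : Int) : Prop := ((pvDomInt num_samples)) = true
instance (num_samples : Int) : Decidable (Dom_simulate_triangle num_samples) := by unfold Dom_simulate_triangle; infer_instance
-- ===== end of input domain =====

-- B replaces A's running phase accumulator with a closed-form phase (i*incr) mod 2^32 per index (alternative decomposition, same cost).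


-- ===== PORT A =====
-- A's loop: state (phase, output); output appended at the back, phase updated with & 0xFFFFFFFF.
def pvLoopA : Nat → Int → List Int → List Int
  | 0, _, output => output
  | n + 1, phase, output =>
    let msb : Int := PySem.Int.band (phase >>> 31) 1
    let lower_bits : Int := PySem.Int.band phase 0x7FFFFFFF
    let triangle : Int :=
      if msb = 0 then
        let t := lower_bits <<< 1
        if t ≥ 2 ^ 31 then t - 2 ^ 32 else t
      else
        let inverted := PySem.Int.band (-lower_bits - 1) 0x7FFFFFFF  -- ~x = -x-1
        let t := inverted <<< 1
        if t ≥ 2 ^ 31 then t - 2 ^ 32 else t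
    pvLoopA n (PySem.Int.band (phase + 42949672) 0xFFFFFFFF) (output ++ [triangle])

def simulate_triangle (num_samples : Int) : List Int :=
  pvLoopA num_samples.toNat 0 []

-- ===== PORT B =====
def pvTriSample (phase : Int) : Int :=
  let lower_bits := PySem.Int.band phase 0x7FFFFFFF
  let sel := if PySem.Int.band (phase >>> 31) 1 = 0 then lower_bits
             else PySem.Int.band (-lower_bits - 1) 0x7FFFFFFF
  let t := sel <<< 1
  if t ≥ 2 ^ 31 then t - 2 ^ 32 else t

def simulate_triangle_alt (num_samples : Int) : List Int :=
  (List.range num_samples.toNat).map (fun i : Nat => pvTriSample (((i : Int) * 42949672) % 4294967296))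

-- ===== PRECONDITION & SPEC =====
def Spec_simulate_triangle (num_samples : Int) (out : List Int) : Prop := out = simulate_triangle_alt num_samples
instance (num_samples : Int) (out : List Int) : Decidable (Spec_simulate_triangle num_samples out) := by unfold Spec_simulate_triangle; infer_instance

-- ===== CLAIM (what is proved, stated in full; the proofs are below) =====
def Claim_equal_simulate_triangle : Prop := ∀ (num_samples : Int), Dom_simulate_triangle num_samples → Spec_simulate_triangle num_samples (simulate_triangle num_samples)

-- ===== LEMMAS AND PROOFS =====

-- masking a nonnegative int with 2^32-1 is reduction mod 2^32
lemma band_mask_eq_emod (a : Int) (h : 0 ≤ a) :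
    PySem.Int.band a 0xFFFFFFFF = a % 4294967296 := by
  obtain ⟨m, rfl⟩ := Int.eq_ofNat_of_zero_le h
  have : PySem.Int.band (m : Int) ((4294967295 : Nat) : Int) = ((m &&& 4294967295 : Nat) : Int) :=
    PySem.Int.band_natCast m 4294967295
  rw [show ((0xFFFFFFFF : Int)) = ((4294967295 : Nat) : Int) by norm_num, this,
      Nat.and_two_pow_sub_one_eq_mod m 32]
  push_cast
  rfl

lemma loopA_invariant (n : Nat) : ∀ (k : Nat) (acc : List Int),
    pvLoopA n (((k : Int) * 42949672) % 4294967296) acc =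
      acc ++ (List.range' k n).map (fun i : Nat => pvTriSample (((i : Int) * 42949672) % 4294967296)) := by
  induction n with
  | zero => intro k acc; simp [pvLoopA]
  | succ n ih =>
    intro k acc
    rw [List.range'_succ, List.map_cons]
    show pvLoopA (n + 1) _ acc = _
    rw [pvLoopA]
    have hstep : PySem.Int.band ((((k : Int) * 42949672) % 4294967296) + 42949672) 0xFFFFFFFF
        = (((k + 1 : Nat) : Int) * 42949672) % 4294967296 := by
      rw [band_mask_eq_emod _ (by omega)]
      push_cast
      omega
    rw [hstep, ih (k + 1)]
    simp only [List.append_assoc, List.singleton_append, List.append_cancel_left_eq,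
      List.cons.injEq, and_true]
    simp only [pvTriSample]
    by_cases h : PySem.Int.band (((k : Int) * 42949672 % 4294967296) >>> 31) 1 = 0 <;> simp [h]

-- ===== VERDICT (by name: the statement is the Claim_ definition above) =====
theorem simulate_triangle_spec : Claim_equal_simulate_triangle := by
  intro num_samples _
  unfold Spec_simulate_triangle simulate_triangle simulate_triangle_alt
  have h := loopA_invariant num_samples.toNat 0 []
  norm_num at h
  rw [h, List.range_eq_range']
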